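-- pv_equiv track=rewrite | github.com/Edge-Intelligence-Lab/ChatDKU | chatdku/core/tools/syllabi/generate_sql.py | _collapse_repeated_lines
-- ===== SOURCE A (Python) =====
-- def _collapse_repeated_lines(text: str, max_consecutive: int = 4) -> str:
--     """Collapse long runs of the same consecutive line to avoid runaway repetition.
--
--     Example: if a line repeats 100 times, keep one and add a collapse note.
--     """
--     if not text:
--         return text
--     lines = text.splitlines()
--     out_lines = []
--     prev = None
--     count = 0
--     for line in lines:
--         if line == prev:
--             count += 1
--         else:
--             if prev is not None:
--                 if count > max_consecutive:
--                     out_lines.append(prev)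
--                     out_lines.append(f"...({count + 1} repeated lines collapsed)...")
--                 else:
--                     out_lines.extend([prev] * (count + 1))
--             prev = line
--             count = 0
--
--     # flush
--     if prev is not None:
--         if count > max_consecutive:
--             out_lines.append(prev)
--             out_lines.append(f"...({count + 1} repeated lines collapsed)...")
--         else:
--             out_lines.extend([prev] * (count + 1))
--
--     return "\n".join(out_lines)
-- ===== SOURCE B (Python) =====
-- def _collapse_repeated_lines(text: str, max_consecutive: int = 4) -> str:
--     """Collapse long runs of the same consecutive line.
--
--     Scans the lines BACKWARDS with two index pointers, peeling off the last
--     run each step and emitting its parts in reverse; the output is built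
--     back-to-front and reversed once at the end.
--     """
--     if not text:
--         return text
--     lines = text.splitlines()
--     parts = []
--     j = len(lines)
--     while j > 0:
--         i = j - 1
--         while i > 0 and lines[i - 1] == lines[j - 1]:
--             i -= 1
--         n = j - i
--         if n - 1 > max_consecutive:
--             parts.append(f"...({n} repeated lines collapsed)...")
--             parts.append(lines[j - 1])
--         else:
--             parts.extend([lines[j - 1]] * n)
--         j = i
--     return "\n".join(reversed(parts))
-- ===== Notes on version B (the rewrite author's own statement) =====
-- stated objective: alternative
-- what changed: Replaces A's forward prev/count state machine (with two duplicated flush sites) by a backwards two-pointer index scan that peels off the last run each step and builds the output back-to-front, reversing once at the end.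
import Mathlib
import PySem

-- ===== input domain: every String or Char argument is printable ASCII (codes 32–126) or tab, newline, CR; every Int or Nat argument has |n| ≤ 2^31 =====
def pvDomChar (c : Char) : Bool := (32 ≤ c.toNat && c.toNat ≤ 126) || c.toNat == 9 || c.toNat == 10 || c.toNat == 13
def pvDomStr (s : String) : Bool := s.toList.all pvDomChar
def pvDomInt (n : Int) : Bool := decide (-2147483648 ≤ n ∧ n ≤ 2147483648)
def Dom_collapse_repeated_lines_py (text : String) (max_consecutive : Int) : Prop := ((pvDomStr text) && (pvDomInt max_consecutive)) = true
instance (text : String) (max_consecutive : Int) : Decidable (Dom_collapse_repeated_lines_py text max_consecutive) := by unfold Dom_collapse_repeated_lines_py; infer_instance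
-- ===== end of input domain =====

-- B replaces A's forward prev/count state machine (two duplicated flush sites) by a
-- backwards two-pointer index scan building the output back-to-front (alternative; same cost).


-- ===== PORT A =====
-- the two identical flush blocks of A (loop body and post-loop flush)
def pvFlushA (mc : Int) (prev : String) (count : Int) : List String :=
  if count > mc then
    [prev, "...(" ++ PySem.Int.toStr (count + 1) ++ " repeated lines collapsed)..."]
  else
    List.replicate (count + 1).toNat prev

def collapse_repeated_lines_py (text : String) (max_consecutive : Int) : String :=
  if text = "" then text
  else
    let lines := PySem.Str.splitlines text
    let st := lines.foldl
      (fun (st : List String × Option String × Int) line =>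
        match st.2.1 with
        | some p =>
          if line == p then (st.1, some p, st.2.2 + 1)
          else (st.1 ++ pvFlushA max_consecutive p st.2.2, some line, 0)
        | none => (st.1, some line, 0))
      ([], none, 0)
    let out_lines := match st.2.1 with
      | some p => st.1 ++ pvFlushA max_consecutive p st.2.2
      | none => st.1
    PySem.Str.join "\n" out_lines

-- ===== PORT B =====
-- the inner `while i > 0 and lines[i-1] == lines[j-1]: i -= 1` of Source B, started at i = k
def pvBackB (lines : List String) (x : String) : Nat → Nat
  | 0 => 0
  | (i+1) => if lines.getD i "" == x then pvBackB lines x i else i + 1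

-- needed by pvScanB's termination proof
theorem pvBackB_le (lines : List String) (x : String) : ∀ k, pvBackB lines x k ≤ k := by
  intro k
  induction k with
  | zero => simp [pvBackB]
  | succ i ih => unfold pvBackB; split <;> omega

-- the outer `while j > 0` loop of Source B: parts emitted in append order
def pvScanB (lines : List String) (mc : Int) : Nat → List String
  | 0 => []
  | (k+1) =>
    let x := lines.getD k ""
    let i := pvBackB lines x k
    let n := k + 1 - i
    (if (n : Int) - 1 > mc then
        ["...(" ++ PySem.Int.toStr (n : Int) ++ " repeated lines collapsed)...", x]
      else List.replicate n x) ++ pvScanB lines mc i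
  termination_by k => k
  decreasing_by exact Nat.lt_succ_of_le (pvBackB_le _ _ _)

def collapse_repeated_lines_py_alt (text : String) (max_consecutive : Int) : String :=
  if text = "" then text
  else
    let lines := PySem.Str.splitlines text
    PySem.Str.join "\n" ((pvScanB lines max_consecutive lines.length).reverse)

-- ===== PRECONDITION & SPEC =====
def Spec_collapse_repeated_lines_py (text : String) (max_consecutive : Int) (out : String) : Prop := out = collapse_repeated_lines_py_alt text max_consecutive
instance (text : String) (max_consecutive : Int) (out : String) : Decidable (Spec_collapse_repeated_lines_py text max_consecutive out) := by unfold Spec_collapse_repeated_lines_py; infer_instance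

-- ===== CLAIM (what is proved, stated in full; the proofs are below) =====
def Claim_equal_collapse_repeated_lines_py : Prop := ∀ (text : String) (max_consecutive : Int), Dom_collapse_repeated_lines_py text max_consecutive → Spec_collapse_repeated_lines_py text max_consecutive (collapse_repeated_lines_py text max_consecutive)

-- ===== LEMMAS AND PROOFS =====

-- canonical form both ports are reduced to: the runs of consecutive equal lines
def pvRunsB : List String → List (String × Nat)
  | [] => []
  | x :: xs =>
    (x, (xs.takeWhile (· == x)).length + 1) :: pvRunsB (xs.dropWhile (· == x))
termination_by l => l.length
decreasing_by simp; exact List.length_dropWhile_le _ _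

def pvEmitB (mc : Int) (g : String × Nat) : List String :=
  if (g.2 : Int) - 1 > mc then
    [g.1, "...(" ++ PySem.Int.toStr (g.2 : Int) ++ " repeated lines collapsed)..."]
  else
    List.replicate g.2 g.1

theorem pvRunsB_nil : pvRunsB [] = [] := by rw [pvRunsB]

theorem pvRunsB_cons (x : String) (xs : List String) :
    pvRunsB (x :: xs)
      = (x, (xs.takeWhile (· == x)).length + 1) :: pvRunsB (xs.dropWhile (· == x)) := by
  rw [pvRunsB]

-- ---- A-side: the state machine flushes exactly the runs ----

theorem pvFlushA_eq_emitB (mc : Int) (p : String) (n : Nat) :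
    pvFlushA mc p (n : Int) = pvEmitB mc (p, n + 1) := by
  unfold pvFlushA pvEmitB
  have h : ((n + 1 : Nat) : Int) - 1 = (n : Int) := by push_cast; ring
  simp only [h]
  split_ifs with hc
  · have : ((n : Int) + 1) = ((n + 1 : Nat) : Int) := by push_cast; ring
    rw [this]
  · have : ((n : Int) + 1).toNat = n + 1 := by omega
    rw [this]

def pvStepA (mc : Int) (st : List String × Option String × Int) (line : String) :
    List String × Option String × Int :=
  match st.2.1 with
  | some p =>
    if line == p then (st.1, some p, st.2.2 + 1)
    else (st.1 ++ pvFlushA mc p st.2.2, some line, 0)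
  | none => (st.1, some line, 0)

def pvFinishA (mc : Int) (st : List String × Option String × Int) : List String :=
  match st.2.1 with
  | some p => st.1 ++ pvFlushA mc p st.2.2
  | none => st.1

theorem pvLoopA_runs (mc : Int) (xs : List String) :
    ∀ (out : List String) (p : String) (c : Int),
      pvFinishA mc (xs.foldl (pvStepA mc) (out, some p, c))
        = out ++ pvFlushA mc p (c + (xs.takeWhile (· == p)).length)
              ++ (pvRunsB (xs.dropWhile (· == p))).flatMap (pvEmitB mc) := by
  induction xs with
  | nil =>
    intro out p c
    simp [pvFinishA, pvRunsB_nil]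
  | cons x xs ih =>
    intro out p c
    by_cases hx : x = p
    · subst hx
      have h1 : (x :: xs).takeWhile (· == x) = x :: xs.takeWhile (· == x) := by
        simp [List.takeWhile]
      have h2 : (x :: xs).dropWhile (· == x) = xs.dropWhile (· == x) := by
        simp [List.dropWhile]
      rw [h1, h2]
      simp only [List.foldl_cons, pvStepA, beq_self_eq_true, if_true]
      rw [ih out x (c + 1)]
      congr 2
      push_cast [List.length_cons]
      ring_nf
    · have hbe : (x == p) = false := by simp [hx]
      have h1 : (x :: xs).takeWhile (· == p) = [] := by
        simp [List.takeWhile, hbe]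
      have h2 : (x :: xs).dropWhile (· == p) = x :: xs := by
        simp [List.dropWhile, hbe]
      rw [h1, h2]
      simp only [List.foldl_cons, pvStepA, hbe, Bool.false_eq_true, if_false]
      rw [ih (out ++ pvFlushA mc p c) x 0]
      rw [pvRunsB_cons]
      simp only [List.flatMap_cons, zero_add]
      rw [pvFlushA_eq_emitB]
      simp [List.append_assoc]

theorem pvCollapse_lines (mc : Int) (lines : List String) :
    pvFinishA mc (lines.foldl (pvStepA mc) ([], none, 0))
      = (pvRunsB lines).flatMap (pvEmitB mc) := by
  cases lines with
  | nil => simp [pvFinishA, pvRunsB_nil]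
  | cons x xs =>
    simp only [List.foldl_cons]
    have h0 : pvStepA mc ([], none, 0) x = ([], some x, 0) := by rfl
    rw [h0, pvLoopA_runs mc xs [] x 0, pvRunsB_cons]
    simp only [List.flatMap_cons, zero_add]
    rw [← pvFlushA_eq_emitB]
    simp

-- ---- B-side: the backwards scan emits exactly the runs, reversed ----

theorem pvBackB_run (lines : List String) (x : String) :
    ∀ k m, pvBackB lines x k ≤ m → m < k → lines.getD m "" = x := by
  intro k
  induction k with
  | zero => omega
  | succ i ih =>
    intro m h1 h2
    unfold pvBackB at h1
    split at h1
    · rename_i hc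
      rcases Nat.lt_or_ge m i with hm | hm
      · exact ih m h1 hm
      · have : m = i := by omega
        subst this
        exact eq_of_beq hc
    · omega

theorem pvBackB_stop (lines : List String) (x : String) :
    ∀ k, 0 < pvBackB lines x k → lines.getD (pvBackB lines x k - 1) "" ≠ x := by
  intro k
  induction k with
  | zero => simp [pvBackB]
  | succ i ih =>
    unfold pvBackB
    split
    · exact ih
    · rename_i hc
      intro _
      simp only [Nat.add_sub_cancel]
      intro h
      exact hc (by simpa [List.getD] using h)

theorem pvRunsB_replicate (x : String) (m : Nat) :
    pvRunsB (List.replicate (m + 1) x) = [(x, m + 1)] := by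
  rw [List.replicate_succ, pvRunsB_cons]
  have ht : (List.replicate m x).takeWhile (· == x) = List.replicate m x := by
    rw [List.takeWhile_eq_self_iff]
    intro a ha
    simp [List.eq_of_mem_replicate ha]
  have hd : (List.replicate m x).dropWhile (· == x) = [] := by
    rw [List.dropWhile_eq_nil_iff]
    intro a ha
    simp [List.eq_of_mem_replicate ha]
  rw [ht, hd, pvRunsB_nil]
  simp

theorem pvRunsB_append_run_aux (N : Nat) :
    ∀ (ys : List String), ys.length ≤ N → ∀ (n : Nat) (x : String), 0 < n → ys.getLast? ≠ some x →
      pvRunsB (ys ++ List.replicate n x) = pvRunsB ys ++ [(x, n)] := by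
  induction N with
  | zero =>
    intro ys hys n x hn hlast
    have : ys = [] := List.eq_nil_of_length_eq_zero (by omega)
    subst this
    obtain ⟨m, rfl⟩ : ∃ m, n = m + 1 := ⟨n - 1, by omega⟩
    simpa [pvRunsB_nil] using pvRunsB_replicate x m
  | succ N ihN =>
    intro ys hys n x hn hlast
    match ys with
    | [] =>
      obtain ⟨m, rfl⟩ : ∃ m, n = m + 1 := ⟨n - 1, by omega⟩
      simpa [pvRunsB_nil] using pvRunsB_replicate x m
    | y :: t =>
      by_cases hall : ∀ a ∈ t, a = y
      · -- the whole of ys is one run of y; y ≠ x since getLast? ys = some y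
        have hyx : y ≠ x := by
          intro h; subst h
          apply hlast
          rcases List.eq_nil_or_concat t with rfl | ⟨t', a, rfl⟩
          · simp
          · have : a = y := hall a (by simp)
            subst this
            simpa using List.getLast?_append_of_ne_nil (a :: t') (l₂ := [a]) (by simp)
        obtain ⟨m, rfl⟩ : ∃ m, n = m + 1 := ⟨n - 1, by omega⟩
        have ht : t.takeWhile (· == y) = t := by
          rw [List.takeWhile_eq_self_iff]; intro a ha; simp [hall a ha]
        have hd : t.dropWhile (· == y) = [] := by
          rw [List.dropWhile_eq_nil_iff]; intro a ha; simp [hall a ha]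
        have htw : (t ++ List.replicate (m + 1) x).takeWhile (· == y) = t := by
          rw [List.takeWhile_append]
          simp only [ht]
          simp [List.replicate_succ, Ne.symm hyx]
        have hdw : (t ++ List.replicate (m + 1) x).dropWhile (· == y)
            = List.replicate (m + 1) x := by
          rw [List.dropWhile_append]
          simp [hd, List.replicate_succ, Ne.symm hyx]
        rw [List.cons_append, pvRunsB_cons, htw, hdw, pvRunsB_replicate,
            pvRunsB_cons, ht, hd, pvRunsB_nil]
        simp
      · -- the first run of ys ends inside t
        have htne : t ≠ [] := by rintro rfl; exact hall (by simp)
        have hdne : t.dropWhile (· == y) ≠ [] := by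
          intro h
          rw [List.dropWhile_eq_nil_iff] at h
          exact hall (fun a ha => by simpa using h a ha)
        have htw : (t ++ List.replicate n x).takeWhile (· == y)
            = t.takeWhile (· == y) := by
          rw [List.takeWhile_append]
          split
          · rename_i h
            exfalso
            have heq : t.takeWhile (· == y) = t :=
              (List.takeWhile_prefix _).eq_of_length h
            rw [List.takeWhile_eq_self_iff] at heq
            exact hall (fun a ha => by simpa using heq a ha)
          · rfl
        have hdw : (t ++ List.replicate n x).dropWhile (· == y)
            = t.dropWhile (· == y) ++ List.replicate n x := by
          rw [List.dropWhile_append]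
          simp [hdne]
        have hlast' : (t.dropWhile (· == y)).getLast? ≠ some x := by
          have h1 : (y :: t).getLast? = t.getLast? := by
            simpa using List.getLast?_append_of_ne_nil [y] htne
          have h2 : t.getLast? = (t.dropWhile (· == y)).getLast? := by
            conv_lhs => rw [← List.takeWhile_append_dropWhile (p := (· == y)) (l := t)]
            exact List.getLast?_append_of_ne_nil _ hdne
          rw [h1, h2] at hlast
          exact hlast
        have hlen : (t.dropWhile (· == y)).length ≤ N := by
          have := List.length_dropWhile_le (· == y) t
          simp at hys; omega
        rw [List.cons_append, pvRunsB_cons, htw, hdw,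
            ihN _ hlen n x hn hlast', pvRunsB_cons]
        simp

theorem pvRunsB_append_run (ys : List String) (n : Nat) (x : String)
    (hn : 0 < n) (hlast : ys.getLast? ≠ some x) :
    pvRunsB (ys ++ List.replicate n x) = pvRunsB ys ++ [(x, n)] :=
  pvRunsB_append_run_aux ys.length ys le_rfl n x hn hlast

theorem pvScanB_spec (lines : List String) (mc : Int) :
    ∀ j, j ≤ lines.length →
      (pvScanB lines mc j).reverse = (pvRunsB (lines.take j)).flatMap (pvEmitB mc) := by
  intro j
  induction j using Nat.strong_induction_on with
  | _ j ih =>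
    intro hj
    match j with
    | 0 => simp [pvScanB, pvRunsB_nil]
    | (k+1) =>
      have hk : k < lines.length := by omega
      set x := lines.getD k "" with hx
      set i := pvBackB lines x k with hi
      have hik : i ≤ k := pvBackB_le lines x k
      have hn1 : 1 ≤ k + 1 - i := by omega
      -- decompose the prefix into an untouched part and the trailing run
      have htake : lines.take (k + 1) = lines.take i ++ List.replicate (k + 1 - i) x := by
        apply List.ext_getElem
        · simp; omega
        · intro m hm1 hm2
          simp only [List.length_take] at hm1
          have hmk : m < k + 1 := by omega
          rw [List.getElem_take]
          rcases Nat.lt_or_ge m i with hmi | hmi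
          · rw [List.getElem_append_left (by simp; omega)]
            rw [List.getElem_take]
          · rw [List.getElem_append_right (by simp; omega)]
            rw [List.getElem_replicate]
            rcases Nat.lt_or_ge m k with hmk' | hmk'
            · have := pvBackB_run lines x k m (hi ▸ hmi) hmk'
              rw [← this, List.getD_eq_getElem _ _ (by omega)]
            · have : m = k := by omega
              subst this
              rw [hx, List.getD_eq_getElem _ _ hk]
      have hlast : (lines.take i).getLast? ≠ some x := by
        rcases Nat.eq_zero_or_pos i with hz | hpos
        · simp [hz]
        · have hstop := pvBackB_stop lines x k (hi ▸ hpos)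
          rw [← hi] at hstop
          have hlen : (lines.take i).length = i := by simp; omega
          rw [List.getLast?_eq_getElem?, hlen, List.getElem?_take_of_lt (by omega),
              List.getElem?_eq_getElem (by omega)]
          intro h
          apply hstop
          rw [List.getD_eq_getElem _ _ (by omega)]
          exact Option.some.inj h
      have hruns : pvRunsB (lines.take (k + 1))
          = pvRunsB (lines.take i) ++ [(x, k + 1 - i)] := by
        rw [htake]
        exact pvRunsB_append_run (lines.take i) (k + 1 - i) x (by omega) hlast
      rw [pvScanB]
      simp only [← hx, ← hi]
      rw [List.reverse_append, ih i (by omega) (by omega), hruns, List.flatMap_append]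
      congr 1
      simp only [List.flatMap_cons, List.flatMap_nil, List.append_nil]
      unfold pvEmitB
      split
      · simp
      · simp

-- ===== VERDICT (by name: the statement is the Claim_ definition above) =====
theorem collapse_repeated_lines_py_spec : Claim_equal_collapse_repeated_lines_py := by
  intro text mc _
  unfold Spec_collapse_repeated_lines_py collapse_repeated_lines_py collapse_repeated_lines_py_alt
  by_cases h : text = ""
  · simp [h]
  · simp only [h, if_false]
    have hA : (PySem.Str.splitlines text).foldl
        (fun (st : List String × Option String × Int) line =>
          match st.2.1 with
          | some p =>
            if line == p then (st.1, some p, st.2.2 + 1)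
            else (st.1 ++ pvFlushA mc p st.2.2, some line, 0)
          | none => (st.1, some line, 0)) ([], none, 0)
      = (PySem.Str.splitlines text).foldl (pvStepA mc) ([], none, 0) := rfl
    rw [hA]
    have hA2 := pvCollapse_lines mc (PySem.Str.splitlines text)
    unfold pvFinishA at hA2
    rw [hA2]
    rw [pvScanB_spec (PySem.Str.splitlines text) mc _ le_rfl, List.take_length]
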